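-- pv_equiv track=rewrite | github.com/benliew10/codetect | bot.py | _extract_codes_from_text
-- ===== SOURCE A (Python) =====
-- from typing import List, Set
--
-- def _extract_codes_from_text(text: str) -> List[str]:
-- 	# Normalize newlines
-- 	text = text.replace("\r\n", "\n").replace("\r", "\n")
-- 	results: List[str] = []
-- 	seen = set()
-- 	for raw_line in text.split("\n"):
-- 		line = raw_line.strip()
-- 		if not line:
-- 			continue
-- 		# Support comma-separated values on a single line as well
-- 		parts = [p.strip() for p in line.split(",")]
-- 		for p in parts:
-- 			if not p:
-- 				continue
-- 			if p not in seen: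
-- 				seen.add(p)
-- 				results.append(p)
-- 	return results
-- ===== SOURCE B (Python) =====
-- from typing import List
--
-- def _extract_codes_from_text(text: str) -> List[str]:
-- 	# One flat character scan: carriage return, newline and comma all end the current token;
-- 	# each flushed token is stripped, empties skipped, dedup via a seen-set.
-- 	results: List[str] = []
-- 	seen = set()
-- 	buf: List[str] = []
-- 	for ch in text + "\n":
-- 		if ch in "\r\n,":
-- 			tok = "".join(buf).strip()
-- 			buf = []
-- 			if tok and tok not in seen:
-- 				seen.add(tok)
-- 				results.append(tok)
-- 		else:
-- 			buf.append(ch)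
-- 	return results
-- ===== Notes on version B (the rewrite author's own statement) =====
-- stated objective: simpler
-- what changed: Replaces A's newline normalization plus nested line-then-comma split loops with a single flat character scan that flushes a token buffer at every carriage return, newline or comma, stripping, skipping empties and deduplicating in one pass.
import Mathlib
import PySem

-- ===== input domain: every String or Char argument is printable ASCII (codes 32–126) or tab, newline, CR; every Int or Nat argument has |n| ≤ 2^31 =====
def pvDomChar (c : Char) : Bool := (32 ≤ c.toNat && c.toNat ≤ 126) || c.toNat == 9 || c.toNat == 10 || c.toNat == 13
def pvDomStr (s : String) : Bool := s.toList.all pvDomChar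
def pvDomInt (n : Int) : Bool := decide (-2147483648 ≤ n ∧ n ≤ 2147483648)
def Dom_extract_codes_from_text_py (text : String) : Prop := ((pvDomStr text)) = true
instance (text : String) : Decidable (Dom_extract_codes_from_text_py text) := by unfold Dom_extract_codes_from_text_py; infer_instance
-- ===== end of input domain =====

-- B replaces A's newline normalization plus nested line/comma split loops by one flat
-- character scan flushing a token buffer at every carriage return, newline or comma (objective: simpler).


-- ===== PORT A =====
def extract_codes_from_text_py (text : String) : List String :=
  -- text = text.replace("\r\n", "\n").replace("\r", "\n")
  let t := PySem.Str.replace (PySem.Str.replace text "\r\n" "\n") "\r" "\n"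
  -- for raw_line in text.split("\n"): … (lines kept as Strings, split exact on code points)
  (((PySem.Chars.splitOn t.toList ['\n']).map String.ofList).foldl (fun st raw_line =>
      let line := PySem.Str.strip raw_line
      if line = "" then st
      else
        -- parts = [p.strip() for p in line.split(",")]
        let parts := ((PySem.Chars.splitOn line.toList [',']).map String.ofList).map PySem.Str.strip
        parts.foldl (fun st p =>
          if p = "" then st
          else if st.2.contains p then st
          else (st.1 ++ [p], st.2.add p)) st)
    (([] : List String), PySem.Set.ofList [])).1

-- ===== PORT B =====
def extract_codes_from_text_py_alt (text : String) : List String :=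
  -- for ch in text + "\n": flush buf at '\r'/'\n'/','; tok = "".join(buf).strip()
  ((text.toList ++ ['\n']).foldl (fun (st : List String × PySem.Set String × List Char) c =>
      if c == '\r' || c == '\n' || c == ',' then
        let tok := String.ofList (PySem.Chars.strip st.2.2)
        if tok = "" then (st.1, st.2.1, ([] : List Char))
        else if st.2.1.contains tok then (st.1, st.2.1, ([] : List Char))
        else (st.1 ++ [tok], st.2.1.add tok, ([] : List Char))
      else (st.1, st.2.1, st.2.2 ++ [c]))
    (([] : List String), PySem.Set.ofList [], ([] : List Char))).1

-- ===== PRECONDITION & SPEC =====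
def Spec_extract_codes_from_text_py (text : String) (out : List String) : Prop := out = extract_codes_from_text_py_alt text
instance (text : String) (out : List String) : Decidable (Spec_extract_codes_from_text_py text out) := by unfold Spec_extract_codes_from_text_py; infer_instance

-- ===== CLAIM (what is proved, stated in full; the proofs are below) =====
def Claim_equal_extract_codes_from_text_py : Prop := ∀ (text : String), Dom_extract_codes_from_text_py text → Spec_extract_codes_from_text_py text (extract_codes_from_text_py text)

-- ===== LEMMAS AND PROOFS =====

-- splitting a character list at every delimiter (keeping empty segments)
def pvSplitD (d : Char → Bool) : List Char → List (List Char)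
  | [] => [[]]
  | c :: cs =>
    if d c then [] :: pvSplitD d cs
    else match pvSplitD d cs with
         | s :: r => (c :: s) :: r
         | [] => [[c]]

def pvDelim (c : Char) : Bool := c == '\r' || c == '\n' || c == ','

-- the common dedup-accumulate step (skip empty, skip seen)
def pvDedStep (st : List String × PySem.Set String) (p : String) : List String × PySem.Set String :=
  if p = "" then st
  else if st.2.contains p then st
  else (st.1 ++ [p], st.2.add p)

def pvRun (st : List String × PySem.Set String) (toks : List String) : List String × PySem.Set String :=
  toks.foldl pvDedStep st

def pvTok (L : List (List Char)) : List String :=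
  L.map (fun s => String.ofList (PySem.Chars.strip s))

-- fuel model of PySem.Chars.replace.go
def pvRepl (old new : List Char) : Nat → List Char → List Char
  | 0, l => l
  | _ + 1, [] => []
  | fuel + 1, c :: t =>
    if old.isPrefixOf (c :: t) then new ++ pvRepl old new fuel ((c :: t).drop old.length)
    else c :: pvRepl old new fuel t

theorem pvSplitD_ne_nil (d : Char → Bool) (l : List Char) : pvSplitD d l ≠ [] := by
  cases l with
  | nil => simp [pvSplitD]
  | cons c cs =>
    simp only [pvSplitD]
    split
    · simp
    · split <;> simp

theorem pvSplitD_exists (d : Char → Bool) (l : List Char) : ∃ s r, pvSplitD d l = s :: r := by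
  rcases h : pvSplitD d l with _ | ⟨s, r⟩
  · exact absurd h (pvSplitD_ne_nil d l)
  · exact ⟨s, r, rfl⟩

theorem pvSplitD_cons_pos (d : Char → Bool) (c : Char) (cs : List Char) (h : d c = true) :
    pvSplitD d (c :: cs) = [] :: pvSplitD d cs := by
  simp [pvSplitD, h]

theorem pvSplitD_cons_neg (d : Char → Bool) (c : Char) (cs : List Char) (h : d c = false)
    (s : List Char) (r : List (List Char)) (hs : pvSplitD d cs = s :: r) :
    pvSplitD d (c :: cs) = (c :: s) :: r := by
  simp [pvSplitD, h, hs]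

-- first segment of a split, with a prefix glued on
def pvConsFirst (b : List Char) : List (List Char) → List (List Char)
  | s :: r => (b ++ s) :: r
  | [] => [b]

theorem splitOn_go_spec (d : Char) : ∀ (fuel : Nat) (l cur : List Char) (acc : List (List Char)),
    l.length < fuel →
    PySem.Chars.splitOn.go [d] fuel l cur acc
      = acc.reverse ++ pvConsFirst cur.reverse (pvSplitD (fun c => c == d) l) := by
  intro fuel
  induction fuel with
  | zero => intro l cur acc h; omega
  | succ fuel ih =>
    intro l cur acc h
    cases l with
    | nil =>
      simp [PySem.Chars.splitOn.go, pvSplitD, pvConsFirst]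
    | cons c rest =>
      by_cases hc : c = d
      · subst hc
        have hpre : List.isPrefixOf [c] (c :: rest) = true := by simp [List.isPrefixOf]
        rw [PySem.Chars.splitOn.go, if_pos hpre]
        simp only [List.length_cons, List.length_nil, List.drop_succ_cons, List.drop_zero]
        rw [ih rest [] (cur.reverse :: acc) (by simpa using Nat.lt_of_succ_lt_succ h)]
        obtain ⟨s, r, hs⟩ := pvSplitD_exists (fun x => x == c) rest
        rw [pvSplitD_cons_pos (fun x => x == c) c rest (by simp), hs]
        simp [pvConsFirst]
      · have hpre : List.isPrefixOf [d] (c :: rest) = false := by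
          simp [List.isPrefixOf]; exact fun hdc => absurd hdc.symm hc
        rw [PySem.Chars.splitOn.go, if_neg (by simp [hpre])]
        rw [ih rest (c :: cur) acc (by simpa using Nat.lt_of_succ_lt_succ h)]
        obtain ⟨s, r, hs⟩ := pvSplitD_exists (fun x => x == d) rest
        rw [pvSplitD_cons_neg _ _ _ (by simp [hc]) s r hs]
        simp [hs, pvConsFirst]

theorem splitOn_single (d : Char) (l : List Char) :
    PySem.Chars.splitOn l [d] = pvSplitD (fun c => c == d) l := by
  rw [PySem.Chars.splitOn, splitOn_go_spec d (l.length + 1) l [] [] (by omega)]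
  obtain ⟨s, r, hs⟩ := pvSplitD_exists (fun c => c == d) l
  simp [hs, pvConsFirst]

theorem pvRepl_irrel (old new : List Char) (hold : old ≠ []) :
    ∀ (f1 : Nat) (l : List Char) (f2 : Nat), l.length ≤ f1 → l.length ≤ f2 →
    pvRepl old new f1 l = pvRepl old new f2 l := by
  intro f1
  induction f1 with
  | zero =>
    intro l f2 h1 h2
    have : l = [] := by cases l <;> simp_all
    subst this; cases f2 <;> simp [pvRepl]
  | succ f1 ih =>
    intro l f2 h1 h2
    cases l with
    | nil => cases f2 <;> simp [pvRepl]
    | cons c t =>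
      cases f2 with
      | zero => simp at h2
      | succ f2 =>
        simp only [pvRepl]
        by_cases hp : List.isPrefixOf old (c :: t) = true
        · rw [if_pos hp, if_pos hp]
          have hlen : old.length ≥ 1 := by cases old <;> simp_all
          have hdrop : ((c :: t).drop old.length).length ≤ f1 := by
            simp only [List.length_drop, List.length_cons]
            simp only [List.length_cons] at h1; omega
          have hdrop2 : ((c :: t).drop old.length).length ≤ f2 := by
            simp only [List.length_drop, List.length_cons]
            simp only [List.length_cons] at h2; omega
          rw [ih _ f2 hdrop hdrop2]
        · rw [if_neg hp, if_neg hp]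
          rw [ih t f2 (by simp at h1; omega) (by simp at h2; omega)]

theorem replace_go_spec (old new : List Char) (hold : old ≠ []) :
    ∀ (fuel : Nat) (l acc : List Char), l.length ≤ fuel →
    PySem.Chars.replace.go old new fuel l acc = acc.reverse ++ pvRepl old new fuel l := by
  intro fuel
  induction fuel with
  | zero =>
    intro l acc h
    have : l = [] := by cases l <;> simp_all
    subst this
    simp [PySem.Chars.replace.go, pvRepl]
  | succ fuel ih =>
    intro l acc h
    cases l with
    | nil => simp [PySem.Chars.replace.go, pvRepl]
    | cons c t =>
      rw [PySem.Chars.replace.go]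
      simp only [pvRepl]
      by_cases hp : List.isPrefixOf old (c :: t) = true
      · rw [if_pos hp, if_pos hp]
        have hlen : old.length ≥ 1 := by cases old <;> simp_all
        have hdrop : ((c :: t).drop old.length).length ≤ fuel := by
          simp only [List.length_drop, List.length_cons]
          simp only [List.length_cons] at h; omega
        rw [ih _ (new.reverse ++ acc) hdrop]
        simp
      · rw [if_neg hp, if_neg hp]
        rw [ih t (c :: acc) (by simp at h; omega)]
        simp

theorem replace_eq_pvRepl (old new : List Char) (hold : old ≠ []) (l : List Char) :
    PySem.Chars.replace l old new = pvRepl old new l.length l := by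
  rw [PySem.Chars.replace, if_neg (by simp [List.isEmpty_iff, hold])]
  rw [replace_go_spec old new hold l.length l [] le_rfl]
  simp

-- ---- whitespace / strip facts ----

theorem pv_strip_cons_ws (c : Char) (x : List Char) (h : PySem.Chars.isspace c = true) :
    PySem.Chars.strip (c :: x) = PySem.Chars.strip x := by
  simp [PySem.Chars.strip, PySem.Chars.lstrip, List.dropWhile_cons_of_pos h]

theorem pv_rstrip_snoc_ws (c : Char) (x : List Char) (h : PySem.Chars.isspace c = true) :
    PySem.Chars.rstrip (x ++ [c]) = PySem.Chars.rstrip x := by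
  simp [PySem.Chars.rstrip, List.dropWhile_cons_of_pos h]

theorem pv_rstrip_snoc_not_ws (c : Char) (x : List Char) (h : PySem.Chars.isspace c = false) :
    PySem.Chars.rstrip (x ++ [c]) = x ++ [c] := by
  have h2 : List.dropWhile PySem.Chars.isspace (c :: x.reverse) = c :: x.reverse :=
    List.dropWhile_cons_of_neg (by simp [h])
  simp [PySem.Chars.rstrip, h2]

theorem pv_strip_snoc_ws (c : Char) (x : List Char) (h : PySem.Chars.isspace c = true) :
    PySem.Chars.strip (x ++ [c]) = PySem.Chars.strip x := by
  simp only [PySem.Chars.strip, PySem.Chars.lstrip, List.dropWhile_append]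
  split
  · rename_i he
    rw [List.isEmpty_iff] at he
    rw [List.dropWhile_cons_of_pos h, he]
    rfl
  · exact pv_rstrip_snoc_ws c _ h

theorem pv_strip_nil_all_ws : ∀ l : List Char, PySem.Chars.strip l = [] →
    ∀ c ∈ l, PySem.Chars.isspace c = true := by
  intro l
  induction l with
  | nil => simp
  | cons c t ih =>
    intro h x hx
    by_cases hws : PySem.Chars.isspace c = true
    · rw [pv_strip_cons_ws c t hws] at h
      rcases List.mem_cons.mp hx with rfl | hx
      · exact hws
      · exact ih h x hx
    · exfalso
      have hl : PySem.Chars.lstrip (c :: t) = c :: t := by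
        unfold PySem.Chars.lstrip
        exact List.dropWhile_cons_of_neg (by simp_all)
      rw [show PySem.Chars.strip (c :: t)
            = PySem.Chars.rstrip (PySem.Chars.lstrip (c :: t)) from rfl, hl] at h
      unfold PySem.Chars.rstrip at h
      rw [List.reverse_eq_nil_iff, List.dropWhile_eq_nil_iff] at h
      exact hws (h c (by simp))

-- ---- pvSplitD structural facts ----

theorem pvSplitD_nodelim (d : Char → Bool) (l : List Char) (h : ∀ c ∈ l, d c = false) :
    pvSplitD d l = [l] := by
  induction l with
  | nil => rfl
  | cons c t ih =>
    rw [pvSplitD_cons_neg d c t (h c (by simp)) t [] (ih (fun x hx => h x (by simp [hx])))]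

theorem pvSplitD_snoc (d : Char → Bool) (c : Char) (h : d c = false) :
    ∀ l : List Char, ∃ X z, pvSplitD d l = X ++ [z] ∧ pvSplitD d (l ++ [c]) = X ++ [z ++ [c]] := by
  intro l
  induction l with
  | nil =>
    refine ⟨[], [], rfl, ?_⟩
    simpa using pvSplitD_cons_neg d c [] h [] [] rfl
  | cons x t ih =>
    obtain ⟨X, z, h1, h2⟩ := ih
    by_cases hx : d x = true
    · exact ⟨[] :: X, z, by simp [pvSplitD_cons_pos d x t hx, h1],
        by simpa [pvSplitD_cons_pos d x (t ++ [c]) hx] using h2⟩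
    · rw [Bool.not_eq_true] at hx
      cases X with
      | nil =>
        refine ⟨[], x :: z, ?_, ?_⟩
        · simpa using pvSplitD_cons_neg d x t hx z [] (by simpa using h1)
        · simpa using pvSplitD_cons_neg d x (t ++ [c]) hx (z ++ [c]) [] (by simpa using h2)
      | cons s Xr =>
        refine ⟨(x :: s) :: Xr, z, ?_, ?_⟩
        · simpa using pvSplitD_cons_neg d x t hx s (Xr ++ [z]) (by simpa using h1)
        · simpa using pvSplitD_cons_neg d x (t ++ [c]) hx s (Xr ++ [z ++ [c]]) (by simpa using h2)

-- map strip is unchanged if the line is stripped before splitting (delimiters are not whitespace)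
theorem pv_mapstrip_snoc_ws (d : Char → Bool) (c : Char) (hws : PySem.Chars.isspace c = true)
    (hd : d c = false) (l : List Char) :
    (pvSplitD d (l ++ [c])).map PySem.Chars.strip = (pvSplitD d l).map PySem.Chars.strip := by
  obtain ⟨X, z, h1, h2⟩ := pvSplitD_snoc d c hd l
  rw [h1, h2]
  simp [pv_strip_snoc_ws c z hws]

theorem pv_mapstrip_lstrip (d : Char → Bool) (hnd : ∀ c, PySem.Chars.isspace c = true → d c = false)
    (l : List Char) :
    (pvSplitD d (PySem.Chars.lstrip l)).map PySem.Chars.strip = (pvSplitD d l).map PySem.Chars.strip := by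
  induction l with
  | nil => rfl
  | cons c t ih =>
    by_cases hws : PySem.Chars.isspace c = true
    · rw [show PySem.Chars.lstrip (c :: t) = PySem.Chars.lstrip t from by
        simp [PySem.Chars.lstrip, List.dropWhile_cons_of_pos hws]]
      rw [ih]
      obtain ⟨s, r, hs⟩ := pvSplitD_exists d t
      rw [pvSplitD_cons_neg d c t (hnd c hws) s r hs, hs]
      simp [pv_strip_cons_ws c s hws]
    · have : PySem.Chars.lstrip (c :: t) = c :: t := by
        unfold PySem.Chars.lstrip
        exact List.dropWhile_cons_of_neg (by simp_all)
      rw [this]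

theorem pv_mapstrip_rstrip (d : Char → Bool) (hnd : ∀ c, PySem.Chars.isspace c = true → d c = false)
    (l : List Char) :
    (pvSplitD d (PySem.Chars.rstrip l)).map PySem.Chars.strip = (pvSplitD d l).map PySem.Chars.strip := by
  induction l using List.reverseRecOn with
  | nil => rfl
  | append_singleton t c ih =>
    by_cases hws : PySem.Chars.isspace c = true
    · rw [pv_rstrip_snoc_ws c t hws, ih, pv_mapstrip_snoc_ws d c hws (hnd c hws) t]
    · rw [pv_rstrip_snoc_not_ws c t (by simp_all)]

theorem pv_mapstrip_strip (d : Char → Bool) (hnd : ∀ c, PySem.Chars.isspace c = true → d c = false)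
    (l : List Char) :
    (pvSplitD d (PySem.Chars.strip l)).map PySem.Chars.strip = (pvSplitD d l).map PySem.Chars.strip := by
  rw [show PySem.Chars.strip l = PySem.Chars.rstrip (PySem.Chars.lstrip l) from rfl]
  rw [pv_mapstrip_rstrip d hnd (PySem.Chars.lstrip l), pv_mapstrip_lstrip d hnd l]

-- splitting twice on two delimiter sets = splitting once on their union
theorem pvSplitD_flatMap (d1 d2 : Char → Bool) (cs : List Char) :
    (pvSplitD d1 cs).flatMap (pvSplitD d2) = pvSplitD (fun c => d1 c || d2 c) cs := by
  induction cs with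
  | nil => rfl
  | cons c t ih =>
    by_cases h1 : d1 c = true
    · rw [pvSplitD_cons_pos d1 c t h1, pvSplitD_cons_pos _ c t (by simp [h1])]
      simp only [List.flatMap_cons]
      rw [show pvSplitD d2 [] = [[]] from rfl, ih]
      rfl
    · rw [Bool.not_eq_true] at h1
      obtain ⟨s, r, hs⟩ := pvSplitD_exists d1 t
      rw [pvSplitD_cons_neg d1 c t h1 s r hs]
      simp only [List.flatMap_cons]
      by_cases h2 : d2 c = true
      · rw [pvSplitD_cons_pos d2 c s h2, pvSplitD_cons_pos _ c t (by simp [h2])]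
        rw [← ih, hs]
        simp
      · rw [Bool.not_eq_true] at h2
        obtain ⟨u, v, hu⟩ := pvSplitD_exists d2 s
        rw [pvSplitD_cons_neg d2 c s h2 u v hu]
        have htot : pvSplitD (fun c => d1 c || d2 c) t = u :: (v ++ r.flatMap (pvSplitD d2)) := by
          rw [← ih, hs]; simp [hu]
        rw [pvSplitD_cons_neg _ c t (by simp [h1, h2]) _ _ htot]
        simp

theorem pvSplitD_map (d1 d2 : Char → Bool) (σ : Char → Char)
    (hσ1 : ∀ c, d2 (σ c) = d1 c) (hσ2 : ∀ c, d1 c = false → σ c = c) (l : List Char) :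
    pvSplitD d2 (l.map σ) = pvSplitD d1 l := by
  induction l with
  | nil => rfl
  | cons c t ih =>
    by_cases h1 : d1 c = true
    · rw [List.map_cons, pvSplitD_cons_pos d2 (σ c) _ (by rw [hσ1]; exact h1),
        pvSplitD_cons_pos d1 c t h1, ih]
    · rw [Bool.not_eq_true] at h1
      obtain ⟨s, r, hs⟩ := pvSplitD_exists d1 t
      rw [List.map_cons, hσ2 c h1,
        pvSplitD_cons_neg d2 c _ (by rw [← hσ2 c h1, hσ1]; exact h1) s r (by rw [ih, hs]),
        pvSplitD_cons_neg d1 c t h1 s r hs]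

-- ---- pvRun facts ----

theorem pvRun_append (st : List String × PySem.Set String) (xs ys : List String) :
    pvRun st (xs ++ ys) = pvRun (pvRun st xs) ys := by
  simp [pvRun, List.foldl_append]

theorem pvRun_tok_canon (L : List (List Char)) (st : List String × PySem.Set String) :
    pvRun st (pvTok L)
      = pvRun st ((((L.map PySem.Chars.strip).filter (fun s => !s.isEmpty))).map String.ofList) := by
  induction L generalizing st with
  | nil => rfl
  | cons s r ih =>
    by_cases hs : PySem.Chars.strip s = []
    · have h1 : pvDedStep st (String.ofList (PySem.Chars.strip s)) = st := by
        rw [hs]; simp [pvDedStep, String.ofList_nil]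
      calc pvRun st (pvTok (s :: r))
          = pvRun (pvDedStep st (String.ofList (PySem.Chars.strip s))) (pvTok r) := rfl
        _ = pvRun st (pvTok r) := by rw [h1]
        _ = pvRun st (((r.map PySem.Chars.strip).filter (fun s => !s.isEmpty)).map String.ofList) :=
            ih st
        _ = pvRun st ((((s :: r).map PySem.Chars.strip).filter (fun s => !s.isEmpty)).map
              String.ofList) := by
            rw [List.map_cons, List.filter_cons_of_neg (by simp [hs])]
    · calc pvRun st (pvTok (s :: r))
          = pvRun (pvDedStep st (String.ofList (PySem.Chars.strip s))) (pvTok r) := rfl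
        _ = pvRun (pvDedStep st (String.ofList (PySem.Chars.strip s)))
              (((r.map PySem.Chars.strip).filter (fun s => !s.isEmpty)).map String.ofList) := ih _
        _ = pvRun st ((((s :: r).map PySem.Chars.strip).filter (fun s => !s.isEmpty)).map
              String.ofList) := by
            rw [List.map_cons, List.filter_cons_of_pos (by simp [hs])]
            rfl

theorem pvRun_tok_eq (L1 L2 : List (List Char))
    (h : (L1.map PySem.Chars.strip).filter (fun s => !s.isEmpty)
       = (L2.map PySem.Chars.strip).filter (fun s => !s.isEmpty))
    (st : List String × PySem.Set String) :
    pvRun st (pvTok L1) = pvRun st (pvTok L2) := by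
  rw [pvRun_tok_canon, pvRun_tok_canon, h]

-- ---- the two replaces of A, modelled ----

def pvSigma (c : Char) : Char := if c = '\r' then '\n' else c

theorem pv_replace_cr (l : List Char) :
    PySem.Chars.replace l ['\r'] ['\n'] = l.map pvSigma := by
  rw [replace_eq_pvRepl ['\r'] ['\n'] (by simp) l]
  induction l with
  | nil => rfl
  | cons c t ih =>
    simp only [List.length_cons, pvRepl, List.map_cons]
    by_cases hc : c = '\r'
    · subst hc
      rw [if_pos (by simp [List.isPrefixOf])]
      simp [pvSigma, ih]
    · rw [if_neg (by simp [List.isPrefixOf]; exact fun h => hc h.symm)]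
      simp [pvSigma, hc, ih]

def pvR1 (l : List Char) : List Char := PySem.Chars.replace l ['\r', '\n'] ['\n']

theorem pvR1_nil : pvR1 [] = [] := by
  rw [pvR1, replace_eq_pvRepl _ _ (by simp)]; rfl

theorem pvR1_pair (t : List Char) : pvR1 ('\r' :: '\n' :: t) = '\n' :: pvR1 t := by
  rw [pvR1, pvR1, replace_eq_pvRepl _ _ (by simp), replace_eq_pvRepl _ _ (by simp)]
  simp only [List.length_cons, pvRepl]
  rw [if_pos (by simp [List.isPrefixOf])]
  simp only [List.length_nil, List.drop_succ_cons, List.drop_zero]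
  rw [pvRepl_irrel _ _ (by simp) (t.length + 1) t t.length (by omega) le_rfl]
  rfl

theorem pvR1_cons (c : Char) (t : List Char) (h : ¬(c = '\r' ∧ t.head? = some '\n')) :
    pvR1 (c :: t) = c :: pvR1 t := by
  rw [pvR1, pvR1, replace_eq_pvRepl _ _ (by simp), replace_eq_pvRepl _ _ (by simp)]
  simp only [List.length_cons, pvRepl]
  rw [if_neg ?_]
  · intro hpre
    cases t with
    | nil => simp [List.isPrefixOf] at hpre
    | cons c2 t2 =>
      simp only [List.isPrefixOf, Bool.and_eq_true, beq_iff_eq] at hpre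
      exact h ⟨hpre.1.symm, by rw [← hpre.2.1]; rfl⟩

-- F: the stripped nonempty tokens of a segment list (what pvRun actually consumes)
def pvF (L : List (List Char)) : List (List Char) :=
  (L.map PySem.Chars.strip).filter (fun s => !s.isEmpty)

theorem pvF_cons (s : List Char) (r : List (List Char)) :
    pvF (s :: r) = (if (PySem.Chars.strip s).isEmpty then [] else [PySem.Chars.strip s]) ++ pvF r := by
  simp only [pvF, List.map_cons, List.filter_cons]
  split <;> simp_all

-- collapsing "\r\n" to "\n" does not change the head segment nor the stripped
-- nonempty tokens of the tail (both '\r' and '\n' are delimiters)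
theorem pvQ : ∀ (n : Nat) (cs : List Char), cs.length ≤ n →
    ∃ s1 r1 s2 r2, pvSplitD pvDelim (pvR1 cs) = s1 :: r1 ∧ pvSplitD pvDelim cs = s2 :: r2 ∧
      s1 = s2 ∧ pvF r1 = pvF r2 := by
  intro n
  induction n with
  | zero =>
    intro cs h
    have : cs = [] := by cases cs <;> simp_all
    subst this
    exact ⟨[], [], [], [], by rw [pvR1_nil]; rfl, rfl, rfl, rfl⟩
  | succ n ih =>
    intro cs hn
    cases cs with
    | nil => exact ⟨[], [], [], [], by rw [pvR1_nil]; rfl, rfl, rfl, rfl⟩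
    | cons c t =>
      by_cases hp : c = '\r' ∧ t.head? = some '\n'
      · obtain ⟨rfl, hh⟩ := hp
        cases t with
        | nil => simp at hh
        | cons c2 t2 =>
          have hc2 : c2 = '\n' := by simpa using hh
          subst hc2
          have ht2 : t2.length ≤ n := by simp at hn; omega
          obtain ⟨s1, r1, s2, r2, h1, h2, h3, h4⟩ := ih t2 ht2
          refine ⟨[], pvSplitD pvDelim (pvR1 t2), [], [] :: pvSplitD pvDelim t2,
            ?_, ?_, rfl, ?_⟩
          · rw [pvR1_pair, pvSplitD_cons_pos _ _ _ (by simp [pvDelim])]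
          · rw [pvSplitD_cons_pos _ _ _ (by simp [pvDelim]),
              pvSplitD_cons_pos _ _ _ (by simp [pvDelim])]
          · rw [h1, h2, pvF_cons, pvF_cons, pvF_cons, h3, h4]
            have : PySem.Chars.strip [] = [] := rfl
            simp [this]
      · have hc : pvR1 (c :: t) = c :: pvR1 t := pvR1_cons c t hp
        have ht : t.length ≤ n := by simp at hn; omega
        obtain ⟨s1, r1, s2, r2, h1, h2, h3, h4⟩ := ih t ht
        by_cases hd : pvDelim c = true
        · refine ⟨[], pvSplitD pvDelim (pvR1 t), [], pvSplitD pvDelim t, ?_, ?_, rfl, ?_⟩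
          · rw [hc, pvSplitD_cons_pos _ _ _ hd]
          · rw [pvSplitD_cons_pos _ _ _ hd]
          · rw [h1, h2, pvF_cons, pvF_cons, h3, h4]
        · rw [Bool.not_eq_true] at hd
          refine ⟨c :: s1, r1, c :: s2, r2, ?_, ?_, by rw [h3], h4⟩
          · rw [hc, pvSplitD_cons_neg _ _ _ hd s1 r1 h1]
          · rw [pvSplitD_cons_neg _ _ _ hd s2 r2 h2]

theorem pvF_R1 (cs : List Char) :
    pvF (pvSplitD pvDelim (pvR1 cs)) = pvF (pvSplitD pvDelim cs) := by
  obtain ⟨s1, r1, s2, r2, h1, h2, h3, h4⟩ := pvQ cs.length cs le_rfl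
  rw [h1, h2, pvF_cons, pvF_cons, h3, h4]

-- ---- B side: the character scan is the one-pass split ----

def pvStepB (st : List String × PySem.Set String × List Char) (c : Char) :
    List String × PySem.Set String × List Char :=
  if c == '\r' || c == '\n' || c == ',' then
    if String.ofList (PySem.Chars.strip st.2.2) = "" then (st.1, st.2.1, ([] : List Char))
    else if st.2.1.contains (String.ofList (PySem.Chars.strip st.2.2)) then (st.1, st.2.1, ([] : List Char))
    else (st.1 ++ [String.ofList (PySem.Chars.strip st.2.2)],
          st.2.1.add (String.ofList (PySem.Chars.strip st.2.2)), ([] : List Char))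
  else (st.1, st.2.1, st.2.2 ++ [c])

def pvTokens : List Char → List Char → List String × List Char
  | buf, [] => ([], buf)
  | buf, c :: cs =>
    if pvDelim c then
      (String.ofList (PySem.Chars.strip buf) :: (pvTokens [] cs).1, (pvTokens [] cs).2)
    else pvTokens (buf ++ [c]) cs

theorem pvStepB_delim (st : List String × PySem.Set String × List Char) (c : Char)
    (h : pvDelim c = true) :
    pvStepB st c = ((pvDedStep (st.1, st.2.1) (String.ofList (PySem.Chars.strip st.2.2))).1,
      (pvDedStep (st.1, st.2.1) (String.ofList (PySem.Chars.strip st.2.2))).2, ([] : List Char)) := by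
  rw [pvStepB, if_pos (by exact h)]
  unfold pvDedStep
  split_ifs <;> rfl

theorem pvStepB_nodelim (st : List String × PySem.Set String × List Char) (c : Char)
    (h : pvDelim c = false) :
    pvStepB st c = (st.1, st.2.1, st.2.2 ++ [c]) := by
  rw [pvStepB, if_neg (by rw [show (c == '\r' || c == '\n' || c == ',') = pvDelim c from rfl, h]; simp)]

theorem pvB_fold : ∀ (cs : List Char) (res : List String) (seen : PySem.Set String) (buf : List Char),
    cs.foldl pvStepB (res, seen, buf)
      = ((pvRun (res, seen) (pvTokens buf cs).1).1, (pvRun (res, seen) (pvTokens buf cs).1).2,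
          (pvTokens buf cs).2) := by
  intro cs
  induction cs with
  | nil => intro res seen buf; rfl
  | cons c cs ih =>
    intro res seen buf
    by_cases hd : pvDelim c = true
    · rw [List.foldl_cons, pvStepB_delim (res, seen, buf) c hd]
      rw [ih]
      rw [show pvTokens buf (c :: cs)
            = (String.ofList (PySem.Chars.strip buf) :: (pvTokens [] cs).1, (pvTokens [] cs).2) from by
          rw [pvTokens, if_pos hd]]
      rfl
    · rw [Bool.not_eq_true] at hd
      rw [List.foldl_cons, pvStepB_nodelim (res, seen, buf) c hd, ih]
      rw [show pvTokens buf (c :: cs) = pvTokens (buf ++ [c]) cs from by rw [pvTokens, if_neg (by simp [hd])]]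

theorem pvTokens_snoc : ∀ (cs buf : List Char),
    pvTokens buf (cs ++ ['\n']) = (pvTok (pvConsFirst buf (pvSplitD pvDelim cs)), []) := by
  intro cs
  induction cs with
  | nil =>
    intro buf
    rw [List.nil_append, pvTokens, if_pos (by decide)]
    simp [pvTok, pvConsFirst, pvSplitD, pvTokens]
  | cons c cs ih =>
    intro buf
    by_cases hd : pvDelim c = true
    · rw [List.cons_append, pvTokens, if_pos hd, ih []]
      obtain ⟨v, w, hv⟩ := pvSplitD_exists pvDelim cs
      rw [pvSplitD_cons_pos _ _ _ hd, hv]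
      simp [pvConsFirst, pvTok]
    · rw [Bool.not_eq_true] at hd
      rw [List.cons_append, pvTokens, if_neg (by simp [hd]), ih (buf ++ [c])]
      obtain ⟨v, w, hv⟩ := pvSplitD_exists pvDelim cs
      rw [pvSplitD_cons_neg _ _ _ hd v w hv, hv]
      simp [pvConsFirst, pvTok]

theorem pvB_canon (text : String) :
    extract_codes_from_text_py_alt text
      = (pvRun ([], PySem.Set.ofList []) (pvTok (pvSplitD pvDelim text.toList))).1 := by
  show ((text.toList ++ ['\n']).foldl pvStepB ([], PySem.Set.ofList [], [])).1 = _
  rw [pvB_fold, pvTokens_snoc]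
  obtain ⟨v, w, hv⟩ := pvSplitD_exists pvDelim text.toList
  rw [hv]
  simp [pvConsFirst]

-- ---- A side: the nested splits reduce to the same one-pass split ----

theorem pv_strip_ofList (p : List Char) :
    PySem.Str.strip (String.ofList p) = String.ofList (PySem.Chars.strip p) := by
  apply String.toList_inj.mp
  rw [PySem.Str.toList_strip, String.toList_ofList, String.toList_ofList]

theorem pv_comma_not_ws : ∀ c : Char, PySem.Chars.isspace c = true → (c == ',') = false := by
  intro c h
  by_contra hc
  simp only [Bool.not_eq_false, beq_iff_eq] at hc
  subst hc
  exact absurd h (by decide)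

def pvStepA (st : List String × PySem.Set String) (raw : List Char) :
    List String × PySem.Set String :=
  if PySem.Chars.strip raw = [] then st
  else pvRun st (pvTok (pvSplitD (fun c => c == ',') (PySem.Chars.strip raw)))

theorem pvStepA_run (st : List String × PySem.Set String) (raw : List Char) :
    pvStepA st raw = pvRun st (pvTok (pvSplitD (fun c => c == ',') raw)) := by
  unfold pvStepA
  split
  · rename_i h
    rw [pvSplitD_nodelim _ raw (fun c hc => pv_comma_not_ws c (pv_strip_nil_all_ws raw h c hc))]
    show st = pvDedStep st (String.ofList (PySem.Chars.strip raw))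
    rw [h]
    simp [pvDedStep, String.ofList_nil]
  · exact pvRun_tok_eq _ _ (by
      rw [pv_mapstrip_strip (fun c => c == ',') pv_comma_not_ws raw]) st

theorem pvRun_fold_flatMap (g : List Char → List String) :
    ∀ (L : List (List Char)) (st : List String × PySem.Set String),
    L.foldl (fun st l => pvRun st (g l)) st = pvRun st (L.flatMap g) := by
  intro L
  induction L with
  | nil => intro st; rfl
  | cons l L ih =>
    intro st
    rw [List.foldl_cons, List.flatMap_cons, pvRun_append, ih]

theorem pv_sigma_delim (c : Char) : (pvSigma c == '\n' || pvSigma c == ',') = pvDelim c := by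
  by_cases hc : c = '\r'
  · subst hc; decide
  · rw [show pvSigma c = c from by simp [pvSigma, hc]]
    simp [pvDelim, show (c == '\r') = false from by simp [hc]]

theorem pv_sigma_id (c : Char) (h : pvDelim c = false) : pvSigma c = c := by
  rw [pvSigma, if_neg]
  intro hc
  subst hc
  simp [pvDelim] at h

theorem pvA_canon (text : String) :
    extract_codes_from_text_py text
      = (pvRun ([], PySem.Set.ofList []) (pvTok (pvSplitD pvDelim text.toList))).1 := by
  show (((PySem.Chars.splitOn (PySem.Str.replace (PySem.Str.replace text "\r\n" "\n") "\r" "\n").toList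
      ['\n']).map String.ofList).foldl (fun st raw_line =>
        let line := PySem.Str.strip raw_line
        if line = "" then st
        else
          let parts := ((PySem.Chars.splitOn line.toList [',']).map String.ofList).map PySem.Str.strip
          parts.foldl (fun st p =>
            if p = "" then st
            else if st.2.contains p then st
            else (st.1 ++ [p], st.2.add p)) st)
      (([] : List String), PySem.Set.ofList [])).1 = _
  rw [List.foldl_map]
  have hfun : (fun (st : List String × PySem.Set String) (raw : List Char) =>
      (fun st raw_line =>
        let line := PySem.Str.strip raw_line
        if line = "" then st
        else
          let parts := ((PySem.Chars.splitOn line.toList [',']).map String.ofList).map PySem.Str.strip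
          parts.foldl (fun st p =>
            if p = "" then st
            else if st.2.contains p then st
            else (st.1 ++ [p], st.2.add p)) st) st (String.ofList raw)) = pvStepA := by
    funext st raw
    show (let line := PySem.Str.strip (String.ofList raw)
      if line = "" then st
      else
        let parts := ((PySem.Chars.splitOn line.toList [',']).map String.ofList).map PySem.Str.strip
        parts.foldl (fun st p =>
          if p = "" then st
          else if st.2.contains p then st
          else (st.1 ++ [p], st.2.add p)) st) = pvStepA st raw
    simp only [pv_strip_ofList]
    simp only [show (String.ofList (PySem.Chars.strip raw) = "") ↔ (PySem.Chars.strip raw = [])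
      from by rw [← String.ofList_nil]; exact String.ofList_inj]
    unfold pvStepA
    split
    · rfl
    · rw [String.toList_ofList, splitOn_single]
      show (List.map PySem.Str.strip
          (List.map String.ofList (pvSplitD (fun c => c == ',') (PySem.Chars.strip raw)))).foldl
          pvDedStep st = _
      rw [List.map_map]
      rw [show PySem.Str.strip ∘ String.ofList = fun p => String.ofList (PySem.Chars.strip p) from
        funext fun p => pv_strip_ofList p]
      rfl
  rw [hfun]
  rw [show pvStepA = (fun st l => pvRun st (pvTok (pvSplitD (fun c => c == ',') l))) from
    funext fun st => funext fun raw => pvStepA_run st raw]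
  rw [pvRun_fold_flatMap]
  simp only [pvTok]
  rw [← List.map_flatMap]
  rw [splitOn_single, pvSplitD_flatMap]
  have htl : (PySem.Str.replace (PySem.Str.replace text "\r\n" "\n") "\r" "\n").toList
      = (pvR1 text.toList).map pvSigma := by
    rw [PySem.Str.toList_replace, PySem.Str.toList_replace]
    rw [show ("\r\n" : String).toList = ['\r', '\n'] from by decide,
      show ("\n" : String).toList = ['\n'] from by decide,
      show ("\r" : String).toList = ['\r'] from by decide]
    rw [pv_replace_cr]
    rfl
  rw [htl]
  rw [show pvSplitD (fun c => (fun c => c == '\n') c || (fun c => c == ',') c)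
        ((pvR1 text.toList).map pvSigma) = pvSplitD pvDelim (pvR1 text.toList) from
    pvSplitD_map pvDelim _ pvSigma (fun c => pv_sigma_delim c) pv_sigma_id (pvR1 text.toList)]
  exact congrArg Prod.fst
    (pvRun_tok_eq _ _ (by simpa [pvF] using pvF_R1 text.toList) ([], PySem.Set.ofList []))

-- ===== VERDICT (by name: the statement is the Claim_ definition above) =====
theorem extract_codes_from_text_py_spec : Claim_equal_extract_codes_from_text_py := by
  intro text _h
  unfold Spec_extract_codes_from_text_py
  rw [pvA_canon, pvB_canon]
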